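-- pv_equiv track=rewrite | github.com/EmilKronborg/AoC-2021 | day03/day03.py | part_1
-- ===== SOURCE A (Python) =====
-- def part_1(report):
--     gamma_rate, epsilon_rate = '', ''
--
--     for bit in range(len(report[0])):
--         zeros = sum(number[bit] == '0' for number in report)
--         ones = sum(number[bit] == '1' for number in report)
--         if ones > zeros:
--             gamma_rate += '1'
--             epsilon_rate += '0'
--         else:
--             gamma_rate += '0'
--             epsilon_rate += '1'
--
--     # int(x, 2) converts an integer to binary representation
--     return int(gamma_rate, 2) * int(epsilon_rate, 2)
-- ===== SOURCE B (Python) =====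
-- def part_1(report):
--     m = len(report[0])
--     ones = [0] * m
--     zeros = [0] * m
--     for number in report:
--         ones = [o + (number[i] == '1') for i, o in enumerate(ones)]
--         zeros = [z + (number[i] == '0') for i, z in enumerate(zeros)]
--     gamma = 0
--     for o, z in zip(ones, zeros):
--         gamma = 2 * gamma + (1 if o > z else 0)
--     return gamma * (2 ** m - 1 - gamma)
-- ===== Notes on version B (the rewrite author's own statement) =====
-- stated objective: alternative
-- what changed: B makes one pass over the rows maintaining per-column one/zero counters (instead of A's two full column scans per bit) and folds the counters into an integer gamma, deriving epsilon arithmetically as 2**m-1-gamma instead of building a second bit string and reparsing both with int(_,2).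
import Mathlib
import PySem

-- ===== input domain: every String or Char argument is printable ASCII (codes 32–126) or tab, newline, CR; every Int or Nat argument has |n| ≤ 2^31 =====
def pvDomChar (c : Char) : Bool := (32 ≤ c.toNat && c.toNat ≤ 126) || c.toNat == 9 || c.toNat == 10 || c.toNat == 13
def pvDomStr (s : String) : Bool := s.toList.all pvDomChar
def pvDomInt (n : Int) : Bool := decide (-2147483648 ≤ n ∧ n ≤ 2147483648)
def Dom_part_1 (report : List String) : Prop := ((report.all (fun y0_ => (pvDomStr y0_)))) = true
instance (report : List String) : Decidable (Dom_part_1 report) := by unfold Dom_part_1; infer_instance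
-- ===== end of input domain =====

-- B replaces A's two column scans per bit and parallel gamma/epsilon strings by one row pass
-- accumulating per-column counters, an integer gamma fold, and epsilon = 2^m-1-gamma (alternative decomposition).


-- ===== PORT A =====
-- int(s, 2): exact for the strings A builds, which consist only of '0'/'1' characters
def pvBin (cs : List Char) : Int :=
  cs.foldl (fun a c => 2 * a + (if c = '1' then (1 : Int) else 0)) 0

def part_1 (report : List String) : Int :=
  -- report[0]: Pre_part_1 excludes the empty report, where Python raises IndexError
  let m : Int := PySem.Str.len (report.headD "")
  let ge := (PySem.List.pyRange 0 m 1).foldl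
    (fun (p : List Char × List Char) bit =>
      let zeros : Int := report.foldl
        (fun a number => a + (if PySem.Str.pyGet? number bit = some '0' then 1 else 0)) 0
      let ones : Int := report.foldl
        (fun a number => a + (if PySem.Str.pyGet? number bit = some '1' then 1 else 0)) 0
      if ones > zeros then (p.1 ++ ['1'], p.2 ++ ['0']) else (p.1 ++ ['0'], p.2 ++ ['1']))
    ([], [])
  pvBin ge.1 * pvBin ge.2

-- ===== PORT B =====
def part_1_alt (report : List String) : Int :=
  let m : Int := PySem.Str.len (report.headD "")
  let oz := report.foldl
    (fun (p : List Int × List Int) number =>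
      ((PySem.List.enumerate p.1).map
          (fun io => io.2 + (if PySem.Str.pyGet? number io.1 = some '1' then 1 else 0)),
       (PySem.List.enumerate p.2).map
          (fun iz => iz.2 + (if PySem.Str.pyGet? number iz.1 = some '0' then 1 else 0))))
    (List.replicate m.toNat 0, List.replicate m.toNat 0)
  let gamma := (oz.1.zip oz.2).foldl
    (fun g p => 2 * g + (if p.1 > p.2 then (1 : Int) else 0)) 0
  gamma * (2 ^ m.toNat - 1 - gamma)

-- ===== PRECONDITION & SPEC =====
-- Pre_ excludes exactly the inputs where Python A raises: the empty report (IndexError at report[0]),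
-- a report whose first string is empty (int('', 2) raises ValueError), and reports containing a string
-- shorter than report[0] (IndexError at number[bit]).
def Pre_part_1 (report : List String) : Prop :=
  report ≠ [] ∧ 0 < PySem.Str.len (report.headD "") ∧
    ∀ s ∈ report, PySem.Str.len (report.headD "") ≤ PySem.Str.len s
instance (report : List String) : Decidable (Pre_part_1 report) := by unfold Pre_part_1; infer_instance
def pvWitness_part_1 : List String := ["10", "01", "11"]

def Spec_part_1 (report : List String) (out : Int) : Prop := out = part_1_alt report
instance (report : List String) (out : Int) : Decidable (Spec_part_1 report out) := by unfold Spec_part_1; infer_instance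

-- ===== CLAIM (what is proved, stated in full; the proofs are below) =====
def Claim_equal_part_1 : Prop := ∀ (report : List String), Dom_part_1 report → Pre_part_1 report → Spec_part_1 report (part_1 report)

-- ===== LEMMAS AND PROOFS =====

-- number of rows whose character at column i equals c, as the fold A computes
def pvCnt (report : List String) (c : Char) (i : Int) : Int :=
  report.foldl (fun a number => a + (if PySem.Str.pyGet? number i = some c then 1 else 0)) 0

theorem pvCnt_cons (r : String) (rs : List String) (c : Char) (i : Int) :
    pvCnt (r :: rs) c i
      = (if PySem.Str.pyGet? r i = some c then (1 : Int) else 0) + pvCnt rs c i := by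
  simp [pvCnt, PySem.List.foldl_add]

-- A's loop body, with the column counts named
def pvStep (report : List String) (p : List Char × List Char) (bit : Int) : List Char × List Char :=
  if pvCnt report '1' bit > pvCnt report '0' bit then (p.1 ++ ['1'], p.2 ++ ['0'])
  else (p.1 ++ ['0'], p.2 ++ ['1'])

theorem pvBin_append (l : List Char) (c : Char) :
    pvBin (l ++ [c]) = 2 * pvBin l + (if c = '1' then 1 else 0) := by
  simp [pvBin, List.foldl_append]

-- enumerate of a map over an enumerate keeps the indices aligned
theorem enumerate_map_enumerate {α β : Type} (l : List α) (f : Int × α → β) (s : Int) :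
    PySem.List.enumerate ((PySem.List.enumerate l s).map f) s
      = (PySem.List.enumerate l s).map (fun p => (p.1, f p)) := by
  induction l generalizing s with
  | nil => simp [PySem.List.enumerate]
  | cons x xs ih => simp [PySem.List.enumerate_cons, ih]

-- B's row pass: the counter list is the initial one plus the per-column counts
theorem pvRowPass (rs : List String) (c : Char) (l : List Int) (s : Int) :
    rs.foldl
      (fun (acc : List Int) number =>
        (PySem.List.enumerate acc s).map
          (fun io => io.2 + (if PySem.Str.pyGet? number io.1 = some c then 1 else 0)))
      l
    = (PySem.List.enumerate l s).map (fun io => io.2 + pvCnt rs c io.1) := by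
  induction rs generalizing l with
  | nil =>
      simp only [List.foldl_nil, pvCnt, List.foldl_nil, add_zero]
      exact (PySem.List.map_snd_enumerate l s).symm
  | cons r rs ih =>
      simp only [List.foldl_cons, ih, enumerate_map_enumerate, List.map_map]
      refine List.map_congr_left ?_
      intro p _
      simp only [Function.comp_apply, pvCnt_cons]
      ring

-- the integer the A-side loop has built after the first k columns, as one fold
def pvG (report : List String) (k : Nat) : Int :=
  (PySem.List.pyRange 0 (k : Int) 1).foldl
    (fun g j => 2 * g + (if pvCnt report '1' j > pvCnt report '0' j then (1 : Int) else 0)) 0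

-- A's loop invariant: gamma is pvG, epsilon is its bit-complement 2^k - 1 - pvG
theorem pvAloop (report : List String) (k : Nat) :
    pvBin ((PySem.List.pyRange 0 (k : Int) 1).foldl (pvStep report) ([], [])).1 = pvG report k
    ∧ pvBin ((PySem.List.pyRange 0 (k : Int) 1).foldl (pvStep report) ([], [])).2
        = 2 ^ k - 1 - pvG report k := by
  induction k with
  | zero => simp [pvG, PySem.List.pyRange_one_eq_nil, pvBin]
  | succ k ih =>
      obtain ⟨ih1, ih2⟩ := ih
      have hcast : ((k + 1 : Nat) : Int) = (k : Int) + 1 := by push_cast; ring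
      have hr := PySem.List.pyRange_one_succ_right (a := 0) (b := (k : Int)) (by positivity)
      have hg : pvG report (k + 1)
          = 2 * pvG report k
            + (if pvCnt report '1' (k : Int) > pvCnt report '0' (k : Int) then (1 : Int) else 0) := by
        unfold pvG
        rw [hcast, hr, List.foldl_append, List.foldl_cons, List.foldl_nil]
      rw [hcast, hr, List.foldl_append, List.foldl_cons, List.foldl_nil, hg]
      by_cases hc : pvCnt report '1' (k : Int) > pvCnt report '0' (k : Int)
      · simp only [pvStep, if_pos hc, pvBin_append, ih1, ih2]
        constructor <;> · simp; try ring
      · simp only [pvStep, if_neg hc, pvBin_append, ih1, ih2]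
        constructor <;> · simp; try ring

-- B's counter lists over the whole report, as the per-column counts over the column range
theorem pvBlists (report : List String) (m : Nat) (c : Char) :
    report.foldl
      (fun (acc : List Int) number =>
        (PySem.List.enumerate acc).map
          (fun io => io.2 + (if PySem.Str.pyGet? number io.1 = some c then 1 else 0)))
      (List.replicate m 0)
    = (PySem.List.pyRange 0 (m : Int) 1).map (fun j => pvCnt report c j) := by
  rw [pvRowPass report c (List.replicate m 0) 0,
      PySem.List.enumerate_eq_map_pyRange (List.replicate m (0 : Int)) 0]
  simp only [PySem.List.len_eq, List.length_replicate, List.map_map]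
  refine List.map_congr_left ?_
  intro j hj
  rw [PySem.List.mem_pyRange_one] at hj
  simp only [Function.comp_apply]
  rw [PySem.List.pyGetD_eq_getElem _ 0 hj.1 (by simpa using hj.2)]
  simp

-- ===== VERDICT (by name: the statement is the Claim_ definition above) =====
theorem part_1_spec : Claim_equal_part_1 := by
  intro report _ _
  show part_1 report = part_1_alt report
  have hstep : (fun (p : List Char × List Char) (bit : Int) =>
      let zeros : Int := report.foldl
        (fun a number => a + (if PySem.Str.pyGet? number bit = some '0' then 1 else 0)) 0
      let ones : Int := report.foldl
        (fun a number => a + (if PySem.Str.pyGet? number bit = some '1' then 1 else 0)) 0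
      if ones > zeros then (p.1 ++ ['1'], p.2 ++ ['0']) else (p.1 ++ ['0'], p.2 ++ ['1']))
      = pvStep report := by
    funext p bit
    rfl
  have hm : ((PySem.Str.len (report.headD "")).toNat : Int) = PySem.Str.len (report.headD "") := by
    rw [PySem.Str.len_eq]
    exact Int.toNat_of_nonneg (by positivity)
  unfold part_1 part_1_alt
  dsimp only
  rw [hstep, ← hm, Int.toNat_natCast,
      PySem.List.foldl_prod_mk
        (fun acc number => (PySem.List.enumerate acc).map
            (fun io => io.2 + (if PySem.Str.pyGet? number io.1 = some '1' then 1 else 0)))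
        (fun acc number => (PySem.List.enumerate acc).map
            (fun iz => iz.2 + (if PySem.Str.pyGet? number iz.1 = some '0' then 1 else 0)))
        report]
  dsimp only
  rw [pvBlists, pvBlists, List.zip_map', List.foldl_map]
  obtain ⟨h1, h2⟩ := pvAloop report (PySem.Str.len (report.headD "")).toNat
  rw [h1, h2]
  rfl
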